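-- pv_equiv track=rewrite | github.com/charfeng1/aivalon-game | src/aivalon/core/fsm.py | canonical_team
-- ===== SOURCE A (Python) =====
-- from typing import Any, Awaitable, Callable, Dict, Iterable, List, Optional, Sequence, Tuple, TypeVar
--
-- def canonical_team(members: Iterable[int]) -> Tuple[int, ...]:
--     """Return a sorted, duplicate-free tuple of seat numbers."""
--
--     try:
--         normalized = {int(seat) for seat in members}
--     except Exception as exc:  # pragma: no cover - defensive
--         raise ValueError("Team members must be integers") from exc
--     if not normalized:
--         return tuple()
--     return tuple(sorted(normalized))
-- ===== SOURCE B (Python) =====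
-- def canonical_team(members):
--     """Return a sorted, duplicate-free tuple of seat numbers."""
--     try:
--         seats = [int(seat) for seat in members]
--         seats.sort()
--     except Exception as exc:
--         raise ValueError("Team members must be integers") from exc
--     result = []
--     for s in seats:
--         if not result or result[-1] != s:
--             result.append(s)
--     return tuple(result)
-- ===== Notes on version B (the rewrite author's own statement) =====
-- stated objective: alternative
-- what changed: Replaces the set-comprehension dedup followed by sorted() with sort-first then a single adjacent-difference scan that drops duplicates next to each other.
import Mathlib
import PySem

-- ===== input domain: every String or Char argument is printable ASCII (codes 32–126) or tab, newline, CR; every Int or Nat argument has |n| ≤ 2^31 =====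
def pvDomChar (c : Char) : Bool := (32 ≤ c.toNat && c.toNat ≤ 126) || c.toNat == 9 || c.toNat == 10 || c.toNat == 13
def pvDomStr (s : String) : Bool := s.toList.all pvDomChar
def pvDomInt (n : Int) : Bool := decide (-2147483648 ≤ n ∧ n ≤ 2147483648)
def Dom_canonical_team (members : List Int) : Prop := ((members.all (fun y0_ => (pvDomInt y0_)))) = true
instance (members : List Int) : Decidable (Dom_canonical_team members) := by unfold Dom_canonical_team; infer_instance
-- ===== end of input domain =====

-- B replaces A's build-a-set-then-sort with sort-first-then-adjacent-dedup (alternative decomposition, same cost).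

-- ===== PORT A =====
-- normalized = {int(seat) for seat in members}; int() on an int is the identity.
def canonical_team (members : List Int) : List Int :=
  let normalized : PySem.Set Int := PySem.Set.ofList members
  if normalized = [] then []
  else PySem.List.sorted normalized (fun x => x) false

-- ===== PORT B =====
-- seats = sorted copy of members; then scan appending each s unless it equals result[-1].
def canonical_team_alt (members : List Int) : List Int :=
  let seats := PySem.List.sorted members (fun x => x) false
  seats.foldl (fun res s => if res = [] ∨ res.getLast? ≠ some s then res ++ [s] else res) []

-- ===== PRECONDITION & SPEC =====
def Spec_canonical_team (members : List Int) (out : List Int) : Prop := out = canonical_team_alt members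
instance (members : List Int) (out : List Int) : Decidable (Spec_canonical_team members out) := by unfold Spec_canonical_team; infer_instance

-- ===== CLAIM (what is proved, stated in full; the proofs are below) =====
def Claim_equal_canonical_team : Prop := ∀ (members : List Int), Dom_canonical_team members → Spec_canonical_team members (canonical_team members)

-- ===== LEMMAS AND PROOFS =====

-- B's scan, phrased structurally: keep z unless it equals the last kept element.
def drun (o : Option Int) : List Int → List Int
  | [] => []
  | z :: t => if o = some z then drun o t else z :: drun (some z) t

theorem foldl_step_drun (zs : List Int) : ∀ (acc : List Int),
    zs.foldl (fun res s => if res = [] ∨ res.getLast? ≠ some s then res ++ [s] else res) acc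
      = acc ++ drun acc.getLast? zs := by
  induction zs with
  | nil => intro acc; simp [drun]
  | cons z t ih =>
    intro acc
    rw [List.foldl_cons]
    by_cases h : acc.getLast? = some z
    · have hne : acc ≠ [] := by intro hnil; simp [hnil] at h
      rw [if_neg (by simp [hne, h]), ih acc]
      simp [drun, h]
    · rw [if_pos (Or.inr h), ih (acc ++ [z])]
      simp [drun, h]

theorem mem_drun_sub {x : Int} : ∀ (o : Option Int) (zs : List Int), x ∈ drun o zs → x ∈ zs := by
  intro o zs
  induction zs generalizing o with
  | nil => simp [drun]
  | cons z t ih =>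
    intro hx
    by_cases h : o = some z
    · rw [drun, if_pos h] at hx
      exact List.mem_cons_of_mem _ (ih o hx)
    · rw [drun, if_neg h] at hx
      rcases List.mem_cons.mp hx with rfl | hx
      · exact List.mem_cons_self
      · exact List.mem_cons_of_mem _ (ih (some z) hx)

theorem mem_drun_sup {x : Int} : ∀ (zs : List Int) (o : Option Int), x ∈ zs →
    x ∈ drun o zs ∨ o = some x := by
  intro zs
  induction zs with
  | nil => intro o hx; simp at hx
  | cons z t ih =>
    intro o hx
    by_cases h : o = some z
    · rw [drun, if_pos h]
      rcases List.mem_cons.mp hx with rfl | hx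
      · exact Or.inr h
      · exact ih o hx
    · rw [drun, if_neg h]
      rcases List.mem_cons.mp hx with rfl | hx
      · exact Or.inl List.mem_cons_self
      · rcases ih (some z) hx with h1 | h1
        · exact Or.inl (List.mem_cons_of_mem _ h1)
        · exact Or.inl (by rw [Option.some_inj] at h1; rw [h1]; exact List.mem_cons_self)

theorem drun_gt : ∀ (t : List Int), t.Pairwise (· ≤ ·) →
    ∀ (l : Int), (∀ z ∈ t, l ≤ z) → ∀ y ∈ drun (some l) t, l < y := by
  intro t
  induction t with
  | nil => intro _ l _ y hy; simp [drun] at hy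
  | cons z t ih =>
    intro hp l hl y hy
    rcases List.pairwise_cons.mp hp with ⟨hz, hp'⟩
    by_cases h : (some l : Option Int) = some z
    · rw [drun, if_pos h] at hy
      exact ih hp' l (fun w hw => hl w (List.mem_cons_of_mem _ hw)) y hy
    · rw [drun, if_neg h] at hy
      have hlz : l < z :=
        lt_of_le_of_ne (hl z List.mem_cons_self) (fun e => h (by rw [e]))
      rcases List.mem_cons.mp hy with rfl | hy
      · exact hlz
      · exact lt_trans hlz (ih hp' z hz y hy)

theorem drun_pairwise : ∀ (t : List Int), t.Pairwise (· ≤ ·) →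
    ∀ (o : Option Int), (drun o t).Pairwise (· < ·) := by
  intro t
  induction t with
  | nil => intro _ o; simp [drun]
  | cons z t ih =>
    intro hp o
    rcases List.pairwise_cons.mp hp with ⟨hz, hp'⟩
    by_cases h : o = some z
    · rw [drun, if_pos h]; exact ih hp' o
    · rw [drun, if_neg h]
      exact List.pairwise_cons.mpr ⟨drun_gt t hp' z hz, ih hp' (some z)⟩

theorem drun_nodup (t : List Int) (hp : t.Pairwise (· ≤ ·)) (o : Option Int) :
    (drun o t).Nodup :=
  (drun_pairwise t hp o).imp (fun h => ne_of_lt h)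

-- ===== VERDICT (by name: the statement is the Claim_ definition above) =====
theorem canonical_team_spec : Claim_equal_canonical_team := by
  intro members _
  unfold Spec_canonical_team canonical_team canonical_team_alt
  rw [foldl_step_drun]
  simp only [List.getLast?_nil, List.nil_append]
  set zs := PySem.List.sorted members (fun x => x) false with hzs
  have hpw : zs.Pairwise (· ≤ ·) := PySem.List.sorted_pairwise members (fun x => x)
  have hmem : ∀ x : Int, x ∈ drun none zs ↔ x ∈ PySem.Set.ofList members := by
    intro x
    rw [PySem.Set.mem_ofList]
    constructor
    · intro hx
      exact (PySem.List.mem_sorted members (fun x => x) false x).mp (mem_drun_sub none zs hx)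
    · intro hx
      have hxz : x ∈ zs := (PySem.List.mem_sorted members (fun x => x) false x).mpr hx
      rcases mem_drun_sup zs none hxz with h1 | h1
      · exact h1
      · exact absurd h1 (by simp)
  have hperm : (drun none zs).Perm (PySem.Set.ofList members) :=
    (List.perm_ext_iff_of_nodup (drun_nodup zs hpw none) (PySem.Set.nodup_ofList members)).mpr hmem
  by_cases hnil : (PySem.Set.ofList members : List Int) = []
  · rw [if_pos hnil]
    have hp2 := hperm
    rw [hnil] at hp2
    exact (List.Perm.eq_nil hp2).symm
  · rw [if_neg hnil]
    exact PySem.List.sorted_eq_of_perm_of_pairwise_lt _ _ _ hperm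
      (drun_pairwise zs hpw none)
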